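-- pv_equiv track=rewrite | github.com/polyphony-dev/polyphony | tests/loop/while01.py | while01
-- ===== SOURCE A (Python) =====
-- def while01(x):
--     s1 = 0
--     s2 = 0
--     i = 0
--     while i < x:
--         s1 += i
--         s2 += i
--         i = i + 1
--     return s1 + s2
-- ===== SOURCE B (Python) =====
-- def while01(x):
--     # closed form: 2 * sum(0..x-1) = x*(x-1) for x >= 1, else 0
--     return x * (x - 1) if x >= 1 else 0
-- ===== Notes on version B (the rewrite author's own statement) =====
-- stated objective: faster
-- what changed: replaced the counting while-loop (two accumulators summing 0..x-1) by the closed form x*(x-1) for x >= 1 and 0 otherwise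
import Mathlib
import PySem

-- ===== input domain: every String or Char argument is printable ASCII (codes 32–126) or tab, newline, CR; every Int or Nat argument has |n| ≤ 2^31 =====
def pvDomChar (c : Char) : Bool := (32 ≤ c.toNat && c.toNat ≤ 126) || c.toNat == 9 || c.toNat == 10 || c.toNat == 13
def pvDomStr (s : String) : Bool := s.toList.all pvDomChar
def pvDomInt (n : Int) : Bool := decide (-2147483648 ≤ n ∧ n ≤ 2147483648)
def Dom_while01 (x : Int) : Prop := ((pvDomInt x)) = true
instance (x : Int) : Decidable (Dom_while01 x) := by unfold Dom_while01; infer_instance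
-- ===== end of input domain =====

-- B replaces A's O(x) counting loop by the O(1) closed form x*(x-1) (for x ≥ 1, else 0).

-- ===== PORT A =====
-- the while loop, fuel = number of remaining iterations (x - i), state (i, s1, s2)
def while01Go (x : Int) : Nat → Int → Int → Int → Int
  | 0, _, s1, s2 => s1 + s2
  | n + 1, i, s1, s2 =>
      if i < x then while01Go x n (i + 1) (s1 + i) (s2 + i)
      else s1 + s2

def while01 (x : Int) : Int := while01Go x x.toNat 0 0 0

-- ===== PORT B =====
def while01_alt (x : Int) : Int := if x ≥ 1 then x * (x - 1) else 0

-- ===== PRECONDITION & SPEC =====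
def Spec_while01 (x : Int) (out : Int) : Prop := out = while01_alt x
instance (x : Int) (out : Int) : Decidable (Spec_while01 x out) := by unfold Spec_while01; infer_instance

-- ===== CLAIM (what is proved, stated in full; the proofs are below) =====
def Claim_equal_while01 : Prop := ∀ (x : Int), Dom_while01 x → Spec_while01 x (while01 x)

-- ===== LEMMAS AND PROOFS =====

theorem while01Go_invariant (x : Int) (fuel : Nat) :
    ∀ (i s1 s2 : Int), i ≤ x → (fuel : Int) = x - i →
      while01Go x fuel i s1 s2 = s1 + s2 + x * (x - 1) - i * (i - 1) := by
  induction fuel with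
  | zero =>
      intro i s1 s2 hle hf
      have hix : i = x := by omega
      subst hix
      simp [while01Go]
  | succ n ih =>
      intro i s1 s2 hle hf
      have hlt : i < x := by omega
      rw [while01Go, if_pos hlt,
        ih (i + 1) (s1 + i) (s2 + i) (by omega) (by push_cast at hf; omega)]
      ring

-- ===== VERDICT (by name: the statement is the Claim_ definition above) =====
theorem while01_spec : Claim_equal_while01 := by
  intro x _
  unfold Spec_while01 while01 while01_alt
  by_cases hx : x ≥ 1
  · rw [while01Go_invariant x x.toNat 0 0 0 (by omega) (by omega), if_pos hx]
    ring
  · have : x.toNat = 0 := by omega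
    rw [this, if_neg hx]
    simp [while01Go]
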